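-- pv_equiv track=rewrite | github.com/1969-07-20/GoogleFoobarChallenge | OfflineTester/Level1_TheCakeIsNotALie/solution6.py | solution
-- ===== SOURCE A (Python) =====
-- def solution(s):
--     valid = True
--     for slice_length in range(1, len(s)):
--         if len(s) % slice_length == 0:
--             for i in range(0, len(s), slice_length):
--                 if s[:slice_length] != s[i:i+slice_length]:
--                     valid = False
--                     break
--
--             if valid:
--                 return len(s)//slice_length
--             else:
--                 valid = True
--
--     return 1
-- ===== SOURCE B (Python) =====
-- def solution(s):
--     # smallest rotation trick: first index i >= 1 where s occurs in s+s
--     i = (s + s).find(s, 1)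
--     return len(s) // i if i != -1 else 1
-- ===== Notes on version B (the rewrite author's own statement) =====
-- stated objective: faster
-- what changed: Replaces the divisor-enumerating nested Python loops with the string-rotation trick: the smallest i>=1 with (s+s).find(s,1)==i is the smallest period, so the answer is len(s)//i, computed by one C-level find call.
import Mathlib
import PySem

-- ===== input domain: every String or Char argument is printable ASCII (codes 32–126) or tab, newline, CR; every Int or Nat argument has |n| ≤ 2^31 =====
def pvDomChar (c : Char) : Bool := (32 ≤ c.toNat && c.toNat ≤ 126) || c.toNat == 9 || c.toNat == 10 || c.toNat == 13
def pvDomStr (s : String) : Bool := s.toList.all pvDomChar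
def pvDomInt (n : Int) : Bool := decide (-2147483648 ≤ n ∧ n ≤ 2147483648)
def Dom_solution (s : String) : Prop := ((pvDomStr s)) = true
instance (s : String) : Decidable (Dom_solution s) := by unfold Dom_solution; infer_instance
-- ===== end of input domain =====

-- B replaces A's divisor-enumerating nested loops by the string-rotation trick
-- ((s+s).find(s,1) is the smallest period); measured faster by a constant factor.

-- ===== PORT A =====
-- inner loop 'for i in range(0, len(s), slice_length): if s[:slice_length] != s[i:i+slice_length]: valid=False; break'
-- (valid afterwards ⟺ every compared slice equals the prefix)
def solutionInner (l : List Char) (d : Nat) : Bool :=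
  (PySem.List.pyRange 0 (l.length : Int) (d : Int)).all fun i =>
    PySem.List.slice l (some 0) (some (d : Int)) == PySem.List.slice l (some i) (some (i + (d : Int)))

-- outer loop 'for slice_length in range(1, len(s))' with the early returns
def solutionLoopA (l : List Char) (d : Nat) : Int :=
  if _h : d < l.length then
    if PySem.Int.mod (l.length : Int) (d : Int) == 0 then
      if solutionInner l d then PySem.Int.floordiv (l.length : Int) (d : Int)
      else solutionLoopA l (d + 1)
    else solutionLoopA l (d + 1)
  else 1
termination_by l.length - d

def solution (s : String) : Int := solutionLoopA s.toList 1

-- ===== PORT B =====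
def solution_alt (s : String) : Int :=
  let l := s.toList
  let i := PySem.Chars.findFrom (l ++ l) l 1 none     -- (s + s).find(s, 1)
  if i != -1 then PySem.Int.floordiv (l.length : Int) i else 1

-- ===== PRECONDITION & SPEC =====
def Spec_solution (s : String) (out : Int) : Prop := out = solution_alt s
instance (s : String) (out : Int) : Decidable (Spec_solution s out) := by unfold Spec_solution; infer_instance

-- ===== CLAIM (what is proved, stated in full; the proofs are below) =====
def Claim_equal_solution : Prop := ∀ (s : String), Dom_solution s → Spec_solution s (solution s)

-- ===== LEMMAS AND PROOFS =====

-- s occurs in (s+s) at offset j (1 ≤ j ≤ |s|) iff rotating s by j fixes it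
theorem pv_prefix_drop_iff (l : List Char) (j : Nat) (hj : j ≤ l.length) :
    l <+: (l ++ l).drop j ↔ l.rotate j = l := by
  rw [List.drop_append_of_le_length hj, List.prefix_iff_eq_take,
      List.rotate_eq_drop_append_take hj]
  have hlen : (List.drop j l).length = l.length - j := by simp
  have : List.take l.length (List.drop j l ++ l)
      = List.drop j l ++ List.take j l := by
    rw [List.take_append, List.take_of_length_le (by simp), List.length_drop]
    congr 2
    omega
  rw [this]
  exact ⟨fun h => h.symm, fun h => h.symm⟩

-- rotations fixing l are closed under multiples
theorem pv_rotate_mul (l : List Char) (i : Nat) (hfix : l.rotate i = l) :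
    ∀ q : Nat, l.rotate (q * i) = l := by
  intro q
  induction q with
  | zero => simp
  | succ q ih =>
      have : l.rotate (q * i + i) = (l.rotate (q * i)).rotate i := by
        rw [List.rotate_rotate]
      calc l.rotate ((q + 1) * i) = l.rotate (q * i + i) := by ring_nf
        _ = (l.rotate (q * i)).rotate i := this
        _ = l.rotate i := by rw [ih]
        _ = l := hfix

-- the minimal positive rotation period divides the length
theorem pv_rot_dvd (l : List Char) (i : Nat) (hi1 : 1 ≤ i) (_hin : i ≤ l.length)
    (hfix : l.rotate i = l) (hmin : ∀ k, 1 ≤ k → k < i → l.rotate k ≠ l) :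
    i ∣ l.length := by
  set n := l.length with hn
  have hrot_r : l.rotate (n % i) = l := by
    have h1 : l.rotate ((n / i) * i) = l := pv_rotate_mul l i hfix (n / i)
    have h2 : l.rotate n = l := List.rotate_length l
    have heq : (n / i) * i + n % i = n := by
      have h := Nat.div_add_mod n i
      have hcomm : (n / i) * i = i * (n / i) := Nat.mul_comm _ _
      omega
    calc l.rotate (n % i)
        = (l.rotate ((n / i) * i)).rotate (n % i) := by rw [h1]
      _ = l.rotate ((n / i) * i + n % i) := List.rotate_rotate l _ _
      _ = l.rotate n := by rw [heq]
      _ = l := h2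
  by_contra hnd
  have hr1 : 1 ≤ n % i := by
    rcases Nat.eq_zero_or_pos (n % i) with h | h
    · exact absurd (Nat.dvd_of_mod_eq_zero h) hnd
    · exact h
  exact hmin (n % i) hr1 (Nat.mod_lt n (by omega)) hrot_r

-- block condition: every d-block of l equals the first one
def pvBlocks (l : List Char) (d : Nat) : Prop :=
  ∀ k : Nat, k * d < l.length → (l.drop (k * d)).take d = l.take d

theorem pv_inner_iff_blocks (l : List Char) (d : Nat) (hd : 1 ≤ d) :
    solutionInner l d = true ↔ pvBlocks l d := by
  unfold solutionInner pvBlocks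
  rw [List.all_eq_true]
  constructor
  · intro h k hk
    have hmem : (((k * d : Nat)) : Int) ∈ PySem.List.pyRange 0 (l.length : Int) (d : Int) := by
      rw [PySem.List.mem_pyRange_iff_of_pos (by exact_mod_cast hd)]
      refine ⟨by positivity, by exact_mod_cast hk, ⟨(k : Int), by push_cast; ring⟩⟩
    have := h _ hmem
    rw [PySem.List.slice_natCast_add, beq_iff_eq] at this
    have h0 : PySem.List.slice l (some 0) (some (d : Int)) = l.take d := by
      rw [PySem.List.slice_zero_start, PySem.List.slice_to_natCast]
    rw [h0] at this
    exact this.symm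
  · intro h x hx
    rw [PySem.List.mem_pyRange_iff_of_pos (by exact_mod_cast hd)] at hx
    obtain ⟨hx0, hxn, c, hc⟩ := hx
    have hd' : (1 : Int) ≤ (d : Int) := by exact_mod_cast hd
    have hc' : x = (d : Int) * c := by omega
    have hc0 : 0 ≤ c := by nlinarith
    obtain ⟨k, rfl⟩ : ∃ k : Nat, c = (k : Int) := ⟨c.toNat, (Int.toNat_of_nonneg hc0).symm⟩
    have hx' : x = ((k * d : Nat) : Int) := by push_cast; rw [hc']; ring
    subst hx'
    rw [PySem.List.slice_natCast_add, beq_iff_eq]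
    have h0 : PySem.List.slice l (some 0) (some (d : Int)) = l.take d := by
      rw [PySem.List.slice_zero_start, PySem.List.slice_to_natCast]
    rw [h0]
    have hk : k * d < l.length := by exact_mod_cast hxn
    exact (h k hk).symm

theorem pv_blocks_eq_flatten (w : List Char) (d : Nat) (_hd : 0 < d) (_hw : w.length = d) :
    ∀ q (l : List Char), l.length = q * d →
      (∀ k, k < q → (l.drop (k * d)).take d = w) →
      l = (List.replicate q w).flatten := by
  intro q
  induction q with
  | zero => intro l hl _; simp at hl ⊢; exact hl
  | succ q ih =>
      intro l hl hblk
      have h0 : l.take d = w := by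
        have := hblk 0 (Nat.succ_pos q); simpa using this
      have hdrop : l.drop d = (List.replicate q w).flatten := by
        apply ih
        · simp [hl]; ring_nf; omega
        · intro k hk
          rw [List.drop_drop]
          have : d + k * d = (k + 1) * d := by ring
          rw [this]
          exact hblk (k + 1) (by omega)
      calc l = l.take d ++ l.drop d := (List.take_append_drop d l).symm
        _ = w ++ (List.replicate q w).flatten := by rw [h0, hdrop]
        _ = (List.replicate (q + 1) w).flatten := by rw [List.replicate_succ, List.flatten_cons]

theorem pv_rotate_flatten (w : List Char) (q : Nat) (hq : 0 < q) :
    ((List.replicate q w).flatten).rotate w.length = (List.replicate q w).flatten := by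
  obtain ⟨q', rfl⟩ : ∃ q', q = q' + 1 := ⟨q - 1, by omega⟩
  have h1 : (List.replicate (q' + 1) w).flatten = w ++ (List.replicate q' w).flatten := by
    rw [List.replicate_succ, List.flatten_cons]
  have hlen : w.length ≤ (List.replicate (q' + 1) w).flatten.length := by
    rw [h1]; simp
  rw [List.rotate_eq_drop_append_take hlen]
  rw [h1, List.drop_left, List.take_left]
  rw [← List.flatten_cons, ← List.replicate_succ]
  calc (List.replicate q' w).flatten ++ w
      = (List.replicate q' w ++ [w]).flatten := by rw [List.flatten_append]; simp
    _ = (List.replicate (q' + 1) w).flatten := by rw [← List.replicate_succ']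

-- for a divisor d of the length, the block condition is exactly 'rotate d fixes l'
theorem pv_blocks_iff_rotate (l : List Char) (d : Nat) (hd : 1 ≤ d)
    (hdvd : d ∣ l.length) : pvBlocks l d ↔ l.rotate d = l := by
  obtain ⟨q, hq⟩ := hdvd
  constructor
  · intro hb
    rcases Nat.eq_zero_or_pos q with hq0 | hq0
    · subst hq0; simp at hq
      rw [hq]; simp
    · have hdn : d ≤ l.length := by rw [hq]; nlinarith
      have hwlen : (l.take d).length = d := by
        simp [List.length_take]; omega
      have hflat : l = (List.replicate q (l.take d)).flatten := by
        apply pv_blocks_eq_flatten (l.take d) d (by omega) hwlen q l (by rw [hq]; ring)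
        intro k hk
        exact hb k (by rw [hq]; nlinarith)
      calc l.rotate d = l.rotate (l.take d).length := by rw [hwlen]
        _ = ((List.replicate q (l.take d)).flatten).rotate (l.take d).length := by
              rw [← hflat]
        _ = (List.replicate q (l.take d)).flatten := pv_rotate_flatten _ q hq0
        _ = l := hflat.symm
  · intro hrot
    rcases Nat.eq_zero_or_pos q with hq0 | hq0
    · subst hq0
      intro k hk
      exact absurd hk (by omega)
    have hdn : d ≤ l.length := by rw [hq]; nlinarith
    have hsplit : List.drop d l ++ List.take d l = l := by
      rw [← List.rotate_eq_drop_append_take hdn]; exact hrot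
    have hdt : List.drop d l = List.take (l.length - d) l := by
      have h1 : List.take (l.length - d) (List.drop d l ++ List.take d l) = List.drop d l := by
        have : (List.drop d l).length = l.length - d := by simp
        rw [List.take_append, this, Nat.sub_self, List.take_zero, List.append_nil, ← this,
            List.take_length]
      rw [← h1]
      exact congrArg (List.take (l.length - d)) hsplit
    intro k
    induction k with
    | zero => intro _; simp
    | succ k ih =>
        intro hk
        -- (k+1)*d < length and d ∣ length give (k+2)*d ≤ length
        have hkq : k + 1 < q := by nlinarith
        have hk2 : (k + 2) * d ≤ l.length := by nlinarith
        have hkd : k * d < l.length := by nlinarith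
        have step : (l.drop ((k + 1) * d)).take d = (l.drop (k * d)).take d := by
          have h1 : (k + 1) * d = d + k * d := by ring
          rw [h1, ← List.drop_drop, hdt, List.drop_take]
          have e : (k + 2) * d = k * d + d + d := by ring
          have h2 : l.length - d - k * d ≥ d := by omega
          rw [List.take_take]
          congr 1
          omega
        rw [step]
        exact ih hkd

-- key facts about B's found index
theorem pv_find_facts (l : List Char) (hn : 0 < l.length) :
    ∃ j : Nat, PySem.Chars.findFrom (l ++ l) l 1 none = (j : Int) ∧
      1 ≤ j ∧ j ≤ l.length ∧ l.rotate j = l ∧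
      (∀ k, 1 ≤ k → k < j → l.rotate k ≠ l) := by
  set t := l ++ l with ht
  have htlen : (1 : Nat) ≤ t.length := by simp [ht]; omega
  have hne : PySem.Chars.findFrom t l 1 none ≠ -1 := by
    have hinf : l <:+: t.drop 1 := by
      have hdrop : t.drop 1 = l.drop 1 ++ l := List.drop_append_of_le_length (by omega)
      rw [hdrop]
      exact (List.suffix_append _ _).isInfix
    intro hcon
    refine (PySem.Chars.findFrom_natCast_eq_neg_one_iff t l 1 htlen).mp ?_ hinf
    exact_mod_cast hcon
  have hspec := PySem.Chars.findFrom_natCast_spec t l 1 htlen (by exact_mod_cast hne)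
  simp only [Nat.cast_one] at hspec
  obtain ⟨hge, hpre, hmin⟩ := hspec
  set f := PySem.Chars.findFrom t l 1 none with hf
  have hge' : (1 : Int) ≤ f := by exact_mod_cast hge
  refine ⟨f.toNat, by omega, by omega, ?_, ?_, ?_⟩
  · -- j ≤ length: otherwise minimality contradicts the occurrence at offset length
    by_contra hcon
    push_neg at hcon
    have : ¬ l <+: t.drop l.length := hmin l.length (by omega) hcon
    rw [ht, List.drop_left] at this
    exact this (List.prefix_refl l)
  · -- rotate fixes
    have hjle : f.toNat ≤ l.length := by
      by_contra hcon
      push_neg at hcon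
      have : ¬ l <+: t.drop l.length := hmin l.length (by omega) hcon
      rw [ht, List.drop_left] at this
      exact this (List.prefix_refl l)
    exact (pv_prefix_drop_iff l f.toNat hjle).mp hpre
  · intro k hk1 hkf hrot
    have hkle : k ≤ l.length := by
      by_contra hcon
      push_neg at hcon
      have hjle : f.toNat ≤ l.length := by
        by_contra hcon2
        push_neg at hcon2
        have : ¬ l <+: t.drop l.length := hmin l.length (by omega) hcon2
        rw [ht, List.drop_left] at this
        exact this (List.prefix_refl l)
      omega
    exact hmin k hk1 hkf ((pv_prefix_drop_iff l k hkle).mpr hrot)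

theorem pv_floordiv_natCast (a b : Nat) : PySem.Int.floordiv (a : Int) (b : Int) = ((a / b : Nat) : Int) := by
  simp [PySem.Int.floordiv, Int.fdiv_eq_ediv]

-- A's loop returns (length / j) from any start d ≤ j, j the minimal rotation period
theorem pv_loopA_eq (l : List Char) (j : Nat) (hj1 : 1 ≤ j) (hjn : j ≤ l.length)
    (hfix : l.rotate j = l) (hmin : ∀ k, 1 ≤ k → k < j → l.rotate k ≠ l)
    (hdvd : j ∣ l.length) :
    ∀ m d, 1 ≤ d → d ≤ j → j - d ≤ m → solutionLoopA l d = ((l.length / j : Nat) : Int) := by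
  intro m
  induction m with
  | zero =>
      intro d hd1 hdj hm
      have hdj' : d = j := by omega
      subst hdj'
      rcases Nat.lt_or_ge d l.length with hlt | hge
      · rw [solutionLoopA]
        rw [dif_pos hlt]
        have hmod : PySem.Int.mod (l.length : Int) (d : Int) = 0 := by
          rw [PySem.Int.mod_eq_zero_iff_dvd]; exact_mod_cast hdvd
        rw [hmod]
        have hinner : solutionInner l d = true :=
          (pv_inner_iff_blocks l d hd1).mpr ((pv_blocks_iff_rotate l d hd1 hdvd).mpr hfix)
        simp only [hinner, if_true, beq_self_eq_true]
        exact pv_floordiv_natCast l.length d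
      · have hdn : d = l.length := by omega
        rw [solutionLoopA, dif_neg (by omega)]
        rw [hdn, Nat.div_self (by omega)]
        norm_num
  | succ m ih =>
      intro d hd1 hdj hm
      rcases Nat.eq_or_lt_of_le hdj with hdj' | hdlt
      · exact ih d hd1 (le_of_eq hdj') (by omega)
      · have hdn : d < l.length := by omega
        rw [solutionLoopA, dif_pos hdn]
        by_cases hdvd' : d ∣ l.length
        · have hmod : PySem.Int.mod (l.length : Int) (d : Int) = 0 := by
            rw [PySem.Int.mod_eq_zero_iff_dvd]; exact_mod_cast hdvd'
          rw [hmod]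
          have hinner : solutionInner l d = false := by
            by_contra hcon
            have htrue : solutionInner l d = true := by
              cases h : solutionInner l d
              · exact absurd h hcon
              · rfl
            have hrot : l.rotate d = l :=
              (pv_blocks_iff_rotate l d hd1 hdvd').mp ((pv_inner_iff_blocks l d hd1).mp htrue)
            exact hmin d hd1 hdlt hrot
          simp only [hinner, beq_self_eq_true, if_true]
          exact ih (d + 1) (by omega) (by omega) (by omega)
        · have hmod : PySem.Int.mod (l.length : Int) (d : Int) ≠ 0 := by
            rw [Ne, PySem.Int.mod_eq_zero_iff_dvd]
            intro h; exact hdvd' (by exact_mod_cast h)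
          rw [if_neg (by simpa using hmod)]
          exact ih (d + 1) (by omega) (by omega) (by omega)

-- ===== VERDICT (by name: the statement is the Claim_ definition above) =====
theorem solution_spec : Claim_equal_solution := by
  unfold Claim_equal_solution
  intro s _
  unfold Spec_solution solution solution_alt
  set l := s.toList with hl
  rcases Nat.eq_zero_or_pos l.length with h0 | hpos
  · have hnil : l = [] := List.eq_nil_of_length_eq_zero h0
    rw [hnil]
    rw [solutionLoopA]
    have hf : PySem.Chars.findFrom ([] : List Char) ([] : List Char) 1 none = -1 := by decide
    simp [hf]
  · obtain ⟨j, hfeq, hj1, hjn, hfix, hmin⟩ := pv_find_facts l hpos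
    have hdvd : j ∣ l.length := pv_rot_dvd l j hj1 hjn hfix hmin
    have hA : solutionLoopA l 1 = ((l.length / j : Nat) : Int) :=
      pv_loopA_eq l j hj1 hjn hfix hmin hdvd j 1 (le_refl 1) hj1 (by omega)
    rw [hA]
    simp only [hfeq]
    have hne : ((j : Int) != -1) = true := by
      simp
    rw [if_pos hne]
    exact (pv_floordiv_natCast l.length j).symm
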